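-- pv_equiv track=rewrite | github.com/frederic-junier/BCPST | TP3/TP_Listes_852_2016-2017.py | monotone
-- ===== SOURCE A (Python) =====
-- import operator  #module permettant de récupérer les opérateurs de base sous forme de fonction
--
-- def monotone(t):
--     """Retourne un booleen indiquant si une liste est monotone"""
--     assert len(t) >= 2, "La liste doit contenir au moins deux éléments"
--     #on choisit la fonction de comparaison selon l'ordre des deux premiers éléments
--     if t[0] < t[1]:
--         comparaison = operator.gt
--     else:
--         comparaison = operator.lt
--     for k in range(1, len(t) - 1):
--         if comparaison(t[k], t[k + 1]):
--             return False
--     return True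
-- ===== SOURCE B (Python) =====
-- def monotone(t):
--     """Retourne un booleen indiquant si une liste est monotone"""
--     assert len(t) >= 2, "La liste doit contenir au moins deux éléments"
--     if t[0] < t[1]:
--         return t == sorted(t)
--     return t == sorted(t, reverse=True)
-- ===== Notes on version B (the rewrite author's own statement) =====
-- stated objective: idiomatic
-- what changed: B picks the direction once from the first pair and compares the whole list with its sorted (or reverse-sorted) copy, replacing A's early-exit consecutive-pair scan with comparator selection.
import Mathlib
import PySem

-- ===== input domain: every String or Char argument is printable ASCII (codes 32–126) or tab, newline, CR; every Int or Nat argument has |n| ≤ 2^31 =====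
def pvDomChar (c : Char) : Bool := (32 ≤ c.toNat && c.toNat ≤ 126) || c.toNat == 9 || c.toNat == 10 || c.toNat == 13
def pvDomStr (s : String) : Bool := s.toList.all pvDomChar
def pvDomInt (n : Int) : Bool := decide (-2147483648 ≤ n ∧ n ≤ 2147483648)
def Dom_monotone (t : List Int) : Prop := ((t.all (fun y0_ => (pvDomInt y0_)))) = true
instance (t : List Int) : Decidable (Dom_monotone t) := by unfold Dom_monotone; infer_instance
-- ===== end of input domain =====

-- B determines the direction from the first pair and compares the list with its sorted (or reverse-sorted) copy, replacing A's early-exit consecutive-pair scan (idiomatic); Pre_ excludes lists shorter than 2, where A's assert raises.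


-- ===== PORT A =====
-- comparaison = operator.gt / operator.lt chosen from the first two elements
def comparaison (t : List Int) : Int → Int → Bool :=
  if PySem.List.pyGetD t 0 0 < PySem.List.pyGetD t 1 0 then (fun a b => a > b) else (fun a b => a < b)

-- the for-loop with early 'return False' is the 'all' over range(1, len(t)-1)
def monotone (t : List Int) : Bool :=
  (PySem.List.pyRange 1 ((t.length : Int) - 1) 1).all
    (fun k => ! comparaison t (PySem.List.pyGetD t k 0) (PySem.List.pyGetD t (k + 1) 0))

-- ===== PORT B =====
def monotone_alt (t : List Int) : Bool :=
  if PySem.List.pyGetD t 0 0 < PySem.List.pyGetD t 1 0 then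
    decide (t = PySem.List.sorted t (fun x => x) false)
  else
    decide (t = PySem.List.sorted t (fun x => x) true)

-- ===== PRECONDITION & SPEC =====
-- A's (and B's) assert raises AssertionError on lists with fewer than two elements
def Pre_monotone (t : List Int) : Prop := 2 ≤ t.length
instance (t : List Int) : Decidable (Pre_monotone t) := by unfold Pre_monotone; infer_instance
def pvWitness_monotone : List Int := [1, 2, 3]

def Spec_monotone (t : List Int) (out : Bool) : Prop := out = monotone_alt t
instance (t : List Int) (out : Bool) : Decidable (Spec_monotone t out) := by unfold Spec_monotone; infer_instance

-- ===== CLAIM (what is proved, stated in full; the proofs are below) =====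
def Claim_equal_monotone : Prop := ∀ (t : List Int), Dom_monotone t → Pre_monotone t → Spec_monotone t (monotone t)

-- ===== LEMMAS AND PROOFS =====

-- A's loop over range(1, len(t)-1) succeeds iff the body holds at every index of the range
lemma loop_eq (n : Int) (p : Int → Bool) :
    ((PySem.List.pyRange 1 (n - 1) 1).all p) = true ↔
    ∀ k : Int, 1 ≤ k → k < n - 1 → p k = true := by
  rw [List.all_eq_true]
  constructor
  · intro H k h1 h2
    exact H k (by rw [PySem.List.mem_pyRange_one]; omega)
  · intro H k hk
    rw [PySem.List.mem_pyRange_one] at hk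
    exact H k hk.1 hk.2

-- R on all consecutive pairs from index 1 on, plus the first pair, is R's getElem chain condition
lemma pairwise_of (t : List Int) (a b : Int) (r : List Int) (ht : t = a :: b :: r)
    (R : Int → Int → Prop) (h0 : R a b) :
    (∀ k : Int, 1 ≤ k → k + 1 < t.length → R (PySem.List.pyGetD t k 0) (PySem.List.pyGetD t (k + 1) 0)) ↔
    ∀ i : Nat, (h : i + 1 < t.length) → R t[i] t[i+1] := by
  constructor
  · intro H i hi
    match i with
    | 0 =>
      subst ht; simpa using h0
    | (n+1) =>
      have := H ((n+1 : Nat) : Int) (by omega) (by push_cast; omega)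
      rw [PySem.List.pyGetD_natCast, show (((n+1 : Nat) : Int) + 1) = ((n+2 : Nat) : Int) by push_cast; ring,
        PySem.List.pyGetD_natCast] at this
      rw [List.getD_eq_getElem (n := n+1) (hn := by omega)] at this
      rw [List.getD_eq_getElem (n := n+2) (hn := by omega)] at this
      exact this
  · intro H k h1 h2
    have hke : k = ((k.toNat : Nat) : Int) := by omega
    rw [hke, PySem.List.pyGetD_natCast,
      show (((k.toNat : Nat) : Int) + 1) = ((k.toNat + 1 : Nat) : Int) by push_cast; ring,
      PySem.List.pyGetD_natCast]
    rw [List.getD_eq_getElem (n := k.toNat) (hn := by omega)]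
    rw [List.getD_eq_getElem (n := k.toNat + 1) (hn := by omega)]
    exact H k.toNat (by omega)

-- a list equals its Python-sorted copy iff it is nondecreasing
lemma eq_sorted_iff (t : List Int) :
    t = PySem.List.sorted t (fun x => x) false ↔ t.Pairwise (· ≤ ·) := by
  constructor
  · intro h; rw [h]; exact PySem.List.sorted_pairwise t (fun x => x)
  · intro h; exact (PySem.List.sorted_eq_self_of_pairwise _ _ h).symm

-- a list equals its reverse-sorted copy iff it is nonincreasing
lemma eq_sorted_rev_iff (t : List Int) :
    t = PySem.List.sorted t (fun x => x) true ↔ t.Pairwise (fun x y => y ≤ x) := by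
  constructor
  · intro h; rw [h]; exact PySem.List.sorted_pairwise_rev t (fun x => x)
  · intro h; exact (PySem.List.sorted_rev_eq_self_of_pairwise _ _ h).symm

lemma main_eq (t : List Int) (h : 2 ≤ t.length) : monotone t = monotone_alt t := by
  obtain ⟨a, b, r, rfl⟩ : ∃ a b r, t = a :: b :: r := by
    match t, h with | a::b::r, _ => exact ⟨a,b,r,rfl⟩
  unfold monotone monotone_alt comparaison
  have h0 : PySem.List.pyGetD (a :: b :: r) 0 0 = a := by simp [pysem]
  have h1 : PySem.List.pyGetD (a :: b :: r) 1 0 = b := by simp [pysem]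
  rw [h0, h1]
  by_cases hab : a < b
  · rw [if_pos hab, if_pos hab, Bool.eq_iff_iff, loop_eq, decide_eq_true_iff, eq_sorted_iff,
      ← List.isChain_iff_pairwise, List.isChain_iff_getElem]
    rw [← pairwise_of (a::b::r) a b r rfl (fun x y => x ≤ y) hab.le]
    constructor
    · intro H k hk1 hk2
      simpa [not_lt] using H k hk1 (by omega)
    · intro H k hk1 hk2
      simpa [not_lt] using H k hk1 (by omega)
  · rw [if_neg hab, if_neg hab, Bool.eq_iff_iff, loop_eq, decide_eq_true_iff, eq_sorted_rev_iff,
      ← List.isChain_iff_pairwise, List.isChain_iff_getElem]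
    rw [← pairwise_of (a::b::r) a b r rfl (fun x y => y ≤ x) (by omega)]
    constructor
    · intro H k hk1 hk2
      simpa [not_lt] using H k hk1 (by omega)
    · intro H k hk1 hk2
      simpa [not_lt] using H k hk1 (by omega)

-- ===== VERDICT (by name: the statement is the Claim_ definition above) =====
theorem monotone_spec : Claim_equal_monotone := by
  intro t _ hpre
  unfold Spec_monotone
  exact main_eq t hpre
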